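-- pv_equiv track=rewrite | github.com/oleg3251/smp | Lab5/cube.py | __build_line
-- ===== SOURCE A (Python) =====
-- def __build_line(size_x, index, sym, length):
--     line = ''
--     for size in range(size_x + 1):
--         if index == 0 or index == length:
--             line += '+' if size == 0 or size == size_x else '-'
--         else:
--             line += sym if size == 0 or size == size_x else ' '
--     return line
-- ===== SOURCE B (Python) =====
-- def __build_line(size_x, index, sym, length):
--     edge, fill = ('+', '-') if index == 0 or index == length else (sym, ' ')
--     chars = [fill] * (size_x + 1)
--     if chars:
--         chars[0] = edge
--         chars[-1] = edge
--     return ''.join(chars)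
-- ===== Notes on version B (the rewrite author's own statement) =====
-- stated objective: simpler
-- what changed: Replaces A's per-character loop with per-index branch tests by one upfront choice of (edge, fill) and a closed-form construction: a replicated fill list whose endpoints are set to the edge, then joined.
import Mathlib
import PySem

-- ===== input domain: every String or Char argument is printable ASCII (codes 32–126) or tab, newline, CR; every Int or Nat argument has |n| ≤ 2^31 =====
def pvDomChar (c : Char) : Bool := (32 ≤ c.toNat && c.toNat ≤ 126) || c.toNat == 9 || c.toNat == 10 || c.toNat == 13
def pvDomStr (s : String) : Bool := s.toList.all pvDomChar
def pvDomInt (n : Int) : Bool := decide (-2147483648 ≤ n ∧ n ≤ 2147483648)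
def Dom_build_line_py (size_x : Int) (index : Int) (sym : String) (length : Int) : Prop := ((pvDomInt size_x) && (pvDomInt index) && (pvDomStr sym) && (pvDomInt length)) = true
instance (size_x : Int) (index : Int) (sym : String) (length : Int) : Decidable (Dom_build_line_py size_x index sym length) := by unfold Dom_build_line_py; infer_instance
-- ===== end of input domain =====

-- ===== PORT A =====
-- B builds the line in closed form (replicate + endpoint writes) instead of A's per-character loop; objective: simpler.
def build_line_py (size_x : Int) (index : Int) (sym : String) (length : Int) : String :=
  (PySem.List.pyRange 0 (size_x + 1) 1).foldl
    (fun line size =>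
      if index == 0 || index == length then
        line ++ (if size == 0 || size == size_x then "+" else "-")
      else
        line ++ (if size == 0 || size == size_x then sym else " "))
    ""

-- ===== PORT B =====
def build_line_py_alt (size_x : Int) (index : Int) (sym : String) (length : Int) : String :=
  let ef : String × String := if index == 0 || index == length then ("+", "-") else (sym, " ")
  let chars := List.replicate (size_x + 1).toNat ef.2
  let chars' := if chars.isEmpty then chars else (chars.set 0 ef.1).set (chars.length - 1) ef.1
  String.join chars' 

-- ===== PRECONDITION & SPEC =====
def Spec_build_line_py (size_x : Int) (index : Int) (sym : String) (length : Int) (out : String) : Prop := out = build_line_py_alt size_x index sym length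
instance (size_x : Int) (index : Int) (sym : String) (length : Int) (out : String) : Decidable (Spec_build_line_py size_x index sym length out) := by unfold Spec_build_line_py; infer_instance

-- ===== CLAIM (what is proved, stated in full; the proofs are below) =====
def Claim_equal_build_line_py : Prop := ∀ (size_x : Int) (index : Int) (sym : String) (length : Int), Dom_build_line_py size_x index sym length → Spec_build_line_py size_x index sym length (build_line_py size_x index sym length)

-- ===== LEMMAS AND PROOFS =====

theorem pv_foldl_shift (l : List String) (x : String) :
    l.foldl (· ++ ·) x = x ++ l.foldl (· ++ ·) "" := by
  induction l generalizing x with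
  | nil => simp
  | cons a t ih =>
    simp only [List.foldl_cons]
    rw [ih (x ++ a), ih ("" ++ a)]
    simp [String.append_assoc]

theorem pv_join_cons (a : String) (l : List String) :
    String.join (a :: l) = a ++ String.join l := by
  simp only [String.join, List.foldl_cons]
  rw [pv_foldl_shift l ("" ++ a)]
  simp

-- foldl that appends f x equals init ++ join of the mapped list
theorem pv_foldl_append_join (l : List Int) (f : Int → String) (s : String) :
    l.foldl (fun acc x => acc ++ f x) s = s ++ String.join (l.map f) := by
  induction l generalizing s with
  | nil => simp [String.join]
  | cons a t ih => simp [List.foldl, ih, pv_join_cons, String.append_assoc]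

theorem pv_map_range_eq_set (size_x : Int) (h : 0 ≤ size_x) (e f : String) :
    (PySem.List.pyRange 0 (size_x + 1) 1).map
      (fun size => if size == 0 || size == size_x then e else f)
      = ((List.replicate (size_x + 1).toNat f).set 0 e).set
          ((List.replicate (size_x + 1).toNat f).length - 1) e := by
  apply List.ext_getElem
  · simp [PySem.List.length_pyRange_one]
  · intro k h1 h2
    simp only at h1
    rw [List.getElem_map, PySem.List.getElem_pyRange_one]
    rw [List.getElem_set, List.getElem_set]
    simp only [List.length_replicate, List.getElem_replicate, beq_iff_eq,
      Bool.or_eq_true, zero_add]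
    have hk : k < (size_x + 1).toNat := by
      simpa [PySem.List.length_pyRange_one] using h1
    split_ifs <;> first | rfl | (exfalso; omega)

theorem pv_line (size_x : Int) (e f : String) :
    (PySem.List.pyRange 0 (size_x + 1) 1).foldl
      (fun line size => line ++ (if size == 0 || size == size_x then e else f)) ""
      = String.join
          (if (List.replicate (size_x + 1).toNat f).isEmpty then
            List.replicate (size_x + 1).toNat f
          else ((List.replicate (size_x + 1).toNat f).set 0 e).set
                 ((List.replicate (size_x + 1).toNat f).length - 1) e) := by
  by_cases hneg : size_x + 1 ≤ 0
  · have h1 : PySem.List.pyRange 0 (size_x + 1) 1 = [] :=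
      PySem.List.pyRange_one_eq_nil hneg
    have h2 : (size_x + 1).toNat = 0 := by omega
    simp [h1, h2, String.join]
  · have h : 0 ≤ size_x := by omega
    have hne : (List.replicate (size_x + 1).toNat f).isEmpty = false := by
      simp; omega
    rw [pv_foldl_append_join, pv_map_range_eq_set size_x h e f, hne]
    simp

theorem build_line_py_eq (size_x : Int) (index : Int) (sym : String) (length : Int) :
    build_line_py size_x index sym length = build_line_py_alt size_x index sym length := by
  unfold build_line_py build_line_py_alt
  by_cases hc : (index == 0 || index == length) = true
  · simp only [hc, if_true]
    exact pv_line size_x "+" "-"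
  · rw [Bool.not_eq_true] at hc
    simp only [hc, Bool.false_eq_true, if_false]
    exact pv_line size_x sym " "

-- ===== VERDICT =====
theorem build_line_py_spec : Claim_equal_build_line_py := by
  intro size_x index sym length _
  unfold Spec_build_line_py
  exact build_line_py_eq size_x index sym length
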